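-- pv_equiv track=rewrite | github.com/maren-handwerk/CryptoBot_Binance_ETL | Step2/2v1ingest_binance_3nf.py | map_tags_to_8_categories
-- ===== SOURCE A (Python) =====
-- CATEGORY_MAP = {
--     "DeFi (Decentralized Finance)": ["defi", "decentralized-finance"],
--     "Stablecoins": ["stablecoin", "asset-backed-stablecoin", "fiat-stablecoin"],
--     "NFTs (Non-Fungible Tokens)": ["nft", "collectibles", "art"],
--     "Gaming & Metaverse": ["gaming", "metaverse", "play-to-earn"],
--     "Exchange Tokens": ["centralized-exchange", "exchange-based-tokens"],
--     "Layer 1 & Layer 2": ["layer-1", "layer-2", "smart-contracts"],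
--     "Privacy Coins": ["privacy"],
--     "AI & Big Data": ["ai-big-data", "big-data"]
-- }
--
-- def map_tags_to_8_categories(raw_tags):
--     if not raw_tags: return "To be defined"
--     matched = []
--     tags_lower = [t.lower() for t in raw_tags]
--     for pretty_name, keywords in CATEGORY_MAP.items():
--         if any(kw in tags_lower for kw in keywords):
--             matched.append(pretty_name)
--     return ", ".join(matched) if matched else "Other / Not Mapped"
-- ===== SOURCE B (Python) =====
-- CATEGORY_MAP = {
--     "DeFi (Decentralized Finance)": ["defi", "decentralized-finance"],
--     "Stablecoins": ["stablecoin", "asset-backed-stablecoin", "fiat-stablecoin"],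
--     "NFTs (Non-Fungible Tokens)": ["nft", "collectibles", "art"],
--     "Gaming & Metaverse": ["gaming", "metaverse", "play-to-earn"],
--     "Exchange Tokens": ["centralized-exchange", "exchange-based-tokens"],
--     "Layer 1 & Layer 2": ["layer-1", "layer-2", "smart-contracts"],
--     "Privacy Coins": ["privacy"],
--     "AI & Big Data": ["ai-big-data", "big-data"]
-- }
--
-- # reverse index: keyword -> pretty category name (keywords are unique across categories)
-- KEYWORD_TO_CATEGORY = {kw: name for name, kws in CATEGORY_MAP.items() for kw in kws}
--
-- def map_tags_to_8_categories(raw_tags):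
--     if not raw_tags:
--         return "To be defined"
--     hit = set()
--     for t in raw_tags:
--         cat = KEYWORD_TO_CATEGORY.get(t.lower())
--         if cat is not None:
--             hit.add(cat)
--     names = [name for name in CATEGORY_MAP if name in hit]
--     return ", ".join(names) if names else "Other / Not Mapped"
-- ===== Notes on version B (the rewrite author's own statement) =====
-- stated objective: faster
-- what changed: Replaces A's per-category inner membership scans over the lowercased tag list by a precomputed keyword-to-category reverse index: one pass over the tags collects matched categories into a set, then CATEGORY_MAP's declared order rebuilds the joined string.
import Mathlib
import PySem

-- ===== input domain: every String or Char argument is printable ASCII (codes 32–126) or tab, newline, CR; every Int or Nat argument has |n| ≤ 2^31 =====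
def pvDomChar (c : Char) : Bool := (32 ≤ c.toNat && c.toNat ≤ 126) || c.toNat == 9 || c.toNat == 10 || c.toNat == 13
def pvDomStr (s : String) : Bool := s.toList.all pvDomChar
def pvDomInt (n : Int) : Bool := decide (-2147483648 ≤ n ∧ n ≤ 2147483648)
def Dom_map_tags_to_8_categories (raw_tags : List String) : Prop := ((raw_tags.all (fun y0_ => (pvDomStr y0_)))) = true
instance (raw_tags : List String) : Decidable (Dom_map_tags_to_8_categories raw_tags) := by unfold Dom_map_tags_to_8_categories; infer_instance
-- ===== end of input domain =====

-- B replaces A's per-category scans of the lowercased tag list by a precomputed keyword→category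
-- reverse index consulted once per tag (idiomatic restructuring; same results).

-- ===== PORT A =====
def CATEGORY_MAP : List (String × List String) := [
  ("DeFi (Decentralized Finance)", ["defi", "decentralized-finance"]),
  ("Stablecoins", ["stablecoin", "asset-backed-stablecoin", "fiat-stablecoin"]),
  ("NFTs (Non-Fungible Tokens)", ["nft", "collectibles", "art"]),
  ("Gaming & Metaverse", ["gaming", "metaverse", "play-to-earn"]),
  ("Exchange Tokens", ["centralized-exchange", "exchange-based-tokens"]),
  ("Layer 1 & Layer 2", ["layer-1", "layer-2", "smart-contracts"]),
  ("Privacy Coins", ["privacy"]),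
  ("AI & Big Data", ["ai-big-data", "big-data"])]

def map_tags_to_8_categories (raw_tags : List String) : String :=
  if raw_tags = [] then "To be defined" else
  let tags_lower := raw_tags.map PySem.Str.lower
  let matched := CATEGORY_MAP.foldl
    (fun acc pk => if pk.2.any (fun kw => tags_lower.contains kw) then acc ++ [pk.1] else acc) []
  if matched ≠ [] then PySem.Str.join ", " matched else "Other / Not Mapped"

-- ===== PORT B =====
-- reverse index: keyword -> pretty category name (dict comprehension over CATEGORY_MAP)
def KEYWORD_TO_CATEGORY : PySem.Dict String String :=
  CATEGORY_MAP.foldl (fun d pk => pk.2.foldl (fun d kw => d.insert kw pk.1) d) PySem.Dict.empty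

def map_tags_to_8_categories_alt (raw_tags : List String) : String :=
  if raw_tags = [] then "To be defined" else
  let hit : PySem.Set String := raw_tags.foldl
    (fun s t => match KEYWORD_TO_CATEGORY.get? (PySem.Str.lower t) with
      | some cat => PySem.Set.add s cat
      | none => s) PySem.Set.empty
  let names := (CATEGORY_MAP.map (·.1)).filter (fun name => PySem.Set.contains hit name)
  if names ≠ [] then PySem.Str.join ", " names else "Other / Not Mapped"

-- ===== PRECONDITION & SPEC =====
def Spec_map_tags_to_8_categories (raw_tags : List String) (out : String) : Prop := out = map_tags_to_8_categories_alt raw_tags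
instance (raw_tags : List String) (out : String) : Decidable (Spec_map_tags_to_8_categories raw_tags out) := by unfold Spec_map_tags_to_8_categories; infer_instance

-- ===== CLAIM (what is proved, stated in full; the proofs are below) =====
def Claim_equal_map_tags_to_8_categories : Prop := ∀ (raw_tags : List String), Dom_map_tags_to_8_categories raw_tags → Spec_map_tags_to_8_categories raw_tags (map_tags_to_8_categories raw_tags)

-- ===== LEMMAS AND PROOFS =====

lemma nodup_keys_K : KEYWORD_TO_CATEGORY.keys.Nodup := by decide

lemma items_K : KEYWORD_TO_CATEGORY.items = [("defi", "DeFi (Decentralized Finance)"), ("decentralized-finance", "DeFi (Decentralized Finance)"),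
  ("stablecoin", "Stablecoins"), ("asset-backed-stablecoin", "Stablecoins"), ("fiat-stablecoin", "Stablecoins"),
  ("nft", "NFTs (Non-Fungible Tokens)"), ("collectibles", "NFTs (Non-Fungible Tokens)"),
  ("art", "NFTs (Non-Fungible Tokens)"), ("gaming", "Gaming & Metaverse"), ("metaverse", "Gaming & Metaverse"),
  ("play-to-earn", "Gaming & Metaverse"), ("centralized-exchange", "Exchange Tokens"),
  ("exchange-based-tokens", "Exchange Tokens"), ("layer-1", "Layer 1 & Layer 2"), ("layer-2", "Layer 1 & Layer 2"),
  ("smart-contracts", "Layer 1 & Layer 2"), ("privacy", "Privacy Coins"), ("ai-big-data", "AI & Big Data"),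
  ("big-data", "AI & Big Data")] := by rfl

-- membership in B's accumulated set of matched categories
lemma mem_hitFold (c : String) (l : List String) (s : PySem.Set String) :
    c ∈ l.foldl (fun s t => match KEYWORD_TO_CATEGORY.get? (PySem.Str.lower t) with
        | some cat => PySem.Set.add s cat | none => s) s ↔
    c ∈ s ∨ ∃ t ∈ l, KEYWORD_TO_CATEGORY.get? (PySem.Str.lower t) = some c := by
  induction l generalizing s with
  | nil => simp
  | cons t l ih =>
    simp only [List.foldl_cons]
    cases h : KEYWORD_TO_CATEGORY.get? (PySem.Str.lower t) with
    | none => rw [ih]; simp [h]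
    | some cat => rw [ih]; simp [h, PySem.Set.mem_add]; tauto

-- A's per-category test coincides with membership of the category in B's hit set
lemma cond_eq_contains (tl : List String) (hit : PySem.Set String)
    (hhit : ∀ c, c ∈ hit ↔ ∃ t ∈ tl, KEYWORD_TO_CATEGORY.get? (PySem.Str.lower t) = some c)
    (pk : String × List String) (hpk : pk ∈ CATEGORY_MAP) :
    (pk.2.any fun kw => (tl.map PySem.Str.lower).contains kw) = PySem.Set.contains hit pk.1 := by
  rw [Bool.eq_iff_iff]
  simp only [List.any_eq_true, List.contains_iff_mem, PySem.Set.contains_iff, hhit,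
    PySem.Dict.get?_eq_some_iff_mem_items _ _ _ nodup_keys_K, items_K, List.mem_map]
  constructor
  · rintro ⟨kw, hkw, t, ht, hlt⟩
    refine ⟨t, ht, ?_⟩
    subst hlt
    fin_cases hpk <;> simp_all
  · rintro ⟨t, ht, hmem⟩
    simp only [List.mem_cons, List.not_mem_nil, or_false, Prod.mk.injEq] at hmem
    fin_cases hpk <;>
      ( rcases hmem with h|h|h|h|h|h|h|h|h|h|h|h|h|h|h|h|h|h|h <;> simp_all <;> exact ⟨t, by tauto, ht⟩ )

-- ===== VERDICT (by name: the statement is the Claim_ definition above) =====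
theorem map_tags_to_8_categories_spec : Claim_equal_map_tags_to_8_categories := by
  intro raw_tags _
  unfold Spec_map_tags_to_8_categories
  by_cases hrt : raw_tags = []
  · subst hrt; rfl
  · simp only [map_tags_to_8_categories, map_tags_to_8_categories_alt, if_neg hrt]
    have hlist :
        CATEGORY_MAP.foldl (fun acc pk =>
            if pk.2.any (fun kw => (raw_tags.map PySem.Str.lower).contains kw) then acc ++ [pk.1] else acc) [] =
        (CATEGORY_MAP.map (·.1)).filter (fun name => PySem.Set.contains
          (raw_tags.foldl (fun s t => match KEYWORD_TO_CATEGORY.get? (PySem.Str.lower t) with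
            | some cat => PySem.Set.add s cat | none => s) PySem.Set.empty) name) := by
      rw [PySem.List.foldl_append_if
            (p := fun pk : String × List String => pk.2.any fun kw => (raw_tags.map PySem.Str.lower).contains kw)
            (f := fun pk : String × List String => pk.1),
          List.nil_append, List.filter_map]
      refine congrArg _ (List.filter_congr ?_)
      intro pk hpk
      exact cond_eq_contains raw_tags _ (fun c => by rw [mem_hitFold]; simp) pk hpk
    rw [hlist]
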